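-- pv_equiv track=rewrite | github.com/Habosjob/Vibe | generate_raw_links.py | sort_files_by_depth
-- ===== SOURCE A (Python) =====
-- def sort_files_by_depth(file_paths):
--     files_by_depth = {}
--
--     for path in file_paths:
--         depth = path.count('/')
--         if depth not in files_by_depth:
--             files_by_depth[depth] = []
--         files_by_depth[depth].append(path)
--
--     sorted_files = []
--     for depth in sorted(files_by_depth.keys()):
--         files_by_depth[depth].sort()
--         sorted_files.extend(files_by_depth[depth])
--
--     return sorted_files
-- ===== SOURCE B (Python) =====
-- def sort_files_by_depth(file_paths):
--     return sorted(file_paths, key=lambda p: (p.count('/'), p))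
-- ===== Notes on version B (the rewrite author's own statement) =====
-- stated objective: simpler
-- what changed: Replaced the depth-keyed bucket dictionary (build table, sort keys, sort each bucket, concatenate) with a single sorted() call using the composite key (path.count('/'), path).
import Mathlib
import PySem

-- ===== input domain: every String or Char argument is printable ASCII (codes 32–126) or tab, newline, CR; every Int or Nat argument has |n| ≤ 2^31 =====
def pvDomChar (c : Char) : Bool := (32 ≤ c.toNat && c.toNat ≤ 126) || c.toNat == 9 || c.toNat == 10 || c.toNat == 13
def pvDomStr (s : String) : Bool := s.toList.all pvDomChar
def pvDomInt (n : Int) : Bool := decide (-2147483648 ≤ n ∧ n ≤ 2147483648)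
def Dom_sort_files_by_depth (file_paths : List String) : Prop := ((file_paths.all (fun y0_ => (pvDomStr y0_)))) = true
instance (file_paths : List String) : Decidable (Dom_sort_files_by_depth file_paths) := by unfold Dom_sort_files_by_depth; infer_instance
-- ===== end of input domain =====

-- B replaces A's depth-bucket dictionary (group, sort keys, sort each bucket, concatenate)
-- with one sorted() call on the composite key (path.count('/'), path): simpler, one pass.

-- ===== PORT A =====
def sort_files_by_depth (file_paths : List String) : List String :=
  let files_by_depth : PySem.Dict Int (List String) :=
    file_paths.foldl (fun d path =>
      let depth : Int := (PySem.Str.count path "/" : Int)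
      let d := if d.contains depth then d else d.insert depth ([] : List String)
      d.modify depth [] (fun l => l ++ [path])) PySem.Dict.empty
  (PySem.List.sorted files_by_depth.keys (fun x => x) false).foldl
    (fun sorted_files depth =>
      sorted_files ++ PySem.List.sorted (files_by_depth.getD depth []) (fun x => x) false) []

-- ===== PORT B =====
def sort_files_by_depth_alt (file_paths : List String) : List String :=
  PySem.List.sorted2 file_paths (fun p => (PySem.Str.count p "/" : Int)) (fun p => p) false

-- ===== PRECONDITION & SPEC =====
def Spec_sort_files_by_depth (file_paths : List String) (out : List String) : Prop := out = sort_files_by_depth_alt file_paths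
instance (file_paths : List String) (out : List String) : Decidable (Spec_sort_files_by_depth file_paths out) := by unfold Spec_sort_files_by_depth; infer_instance

-- ===== CLAIM (what is proved, stated in full; the proofs are below) =====
def Claim_equal_sort_files_by_depth : Prop := ∀ (file_paths : List String), Dom_sort_files_by_depth file_paths → Spec_sort_files_by_depth file_paths (sort_files_by_depth file_paths)

-- ===== LEMMAS AND PROOFS =====

def pvCnt (p : String) : Int := (PySem.Str.count p "/" : Int)

def pvKey (p : String) : Lex (Int × String) := toLex (pvCnt p, p)

def pvStep (d : PySem.Dict Int (List String)) (path : String) : PySem.Dict Int (List String) :=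
  let depth : Int := (PySem.Str.count path "/" : Int)
  let d := if d.contains depth then d else d.insert depth ([] : List String)
  d.modify depth [] (fun l => l ++ [path])

lemma pvStep_getD (d : PySem.Dict Int (List String)) (path : String) (k : Int) :
    (pvStep d path).getD k [] = if pvCnt path = k then d.getD k [] ++ [path] else d.getD k [] := by
  unfold pvStep pvCnt
  cases hc : d.contains ((PySem.Str.count path "/" : Int)) with
  | true =>
      simp only [hc, if_true]
      rw [PySem.Dict.getD_modify]
      rcases eq_or_ne ((PySem.Str.count path "/" : Int)) k with hk | hk
      · subst hk; rw [if_pos rfl]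
      · rw [if_neg (Ne.symm hk), if_neg hk]
  | false =>
      simp only [hc, Bool.false_eq_true, if_false]
      rw [PySem.Dict.getD_modify]
      rcases eq_or_ne ((PySem.Str.count path "/" : Int)) k with hk | hk
      · subst hk
        rw [if_pos rfl, PySem.Dict.getD_insert, if_pos rfl,
          PySem.Dict.getD_of_not_contains _ _ hc, if_pos rfl]
      · rw [if_neg (Ne.symm hk), if_neg hk, PySem.Dict.getD_insert, if_neg (Ne.symm hk)]

lemma pvStep_mem_keys (d : PySem.Dict Int (List String)) (path : String) (k : Int) :
    k ∈ (pvStep d path).keys ↔ k ∈ d.keys ∨ k = pvCnt path := by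
  unfold pvStep pvCnt
  cases hc : d.contains ((PySem.Str.count path "/" : Int)) with
  | true =>
      simp only [hc, if_true, PySem.Dict.keys_modify, PySem.Dict.mem_keys_insert]
      tauto
  | false =>
      simp only [hc, Bool.false_eq_true, if_false, PySem.Dict.keys_modify,
        PySem.Dict.mem_keys_insert]
      tauto

lemma pvStep_nodup (d : PySem.Dict Int (List String)) (path : String) (h : d.keys.Nodup) :
    (pvStep d path).keys.Nodup := by
  unfold pvStep
  cases hc : d.contains ((PySem.Str.count path "/" : Int)) with
  | true =>
      simp only [hc, if_true, PySem.Dict.keys_modify]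
      rw [PySem.Dict.keys_insert_of_contains _ _ hc]
      exact h
  | false =>
      simp only [hc, Bool.false_eq_true, if_false, PySem.Dict.keys_modify]
      rw [PySem.Dict.keys_insert_of_contains _ _ (PySem.Dict.contains_insert_self _ _ _),
        PySem.Dict.keys_insert_of_not_contains _ _ hc]
      have hnm : ((PySem.Str.count path "/" : Int)) ∉ d.keys := by
        intro hmem
        rw [← PySem.Dict.contains_iff_mem_keys] at hmem
        rw [hmem] at hc
        cases hc
      refine List.nodup_append.mpr ⟨h, List.nodup_singleton _, ?_⟩
      intro a ha b hb hab
      rw [List.mem_singleton.mp hb] at hab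
      exact hnm (hab ▸ ha)

lemma pvFoldl_getD (l : List String) (d : PySem.Dict Int (List String)) (k : Int) :
    (l.foldl pvStep d).getD k [] = d.getD k [] ++ l.filter (fun p => pvCnt p == k) := by
  induction l generalizing d with
  | nil => simp
  | cons p t ih =>
      simp only [List.foldl_cons, ih, pvStep_getD, List.filter_cons]
      by_cases h : pvCnt p = k <;> simp [h]

lemma pvFoldl_mem_keys (l : List String) (d : PySem.Dict Int (List String)) (k : Int) :
    k ∈ (l.foldl pvStep d).keys ↔ k ∈ d.keys ∨ k ∈ l.map pvCnt := by
  induction l generalizing d with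
  | nil => simp
  | cons p t ih =>
      simp only [List.foldl_cons, ih, pvStep_mem_keys, List.map_cons, List.mem_cons]
      tauto

lemma pvFoldl_nodup (l : List String) (d : PySem.Dict Int (List String)) (h : d.keys.Nodup) :
    (l.foldl pvStep d).keys.Nodup := by
  induction l generalizing d with
  | nil => exact h
  | cons p t ih => exact ih _ (pvStep_nodup _ _ h)

lemma pvPerm_flatMap_filter (ks : List Int) (xs : List String)
    (hnd : ks.Nodup) (hcov : ∀ x ∈ xs, pvCnt x ∈ ks) :
    (ks.flatMap (fun k => xs.filter (fun p => pvCnt p == k))).Perm xs := by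
  induction ks generalizing xs with
  | nil =>
      have : xs = [] := by
        cases xs with
        | nil => rfl
        | cons a t => exact absurd (hcov a (by simp)) (by simp)
      simp [this]
  | cons k t ih =>
      rw [List.flatMap_cons]
      rcases List.nodup_cons.mp hnd with ⟨hkt, hndt⟩
      have htail : t.flatMap (fun k' => xs.filter (fun p => pvCnt p == k')) =
          t.flatMap (fun k' => (xs.filter (fun p => !(pvCnt p == k))).filter
            (fun p => pvCnt p == k')) := by
        rw [List.flatMap_def, List.flatMap_def]
        refine congrArg List.flatten (List.map_congr_left ?_)
        intro k' hk'
        rw [List.filter_filter]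
        refine List.filter_congr ?_
        intro x hx
        rcases eq_or_ne (pvCnt x) k' with hxk | hxk
        · have : ¬ (pvCnt x == k) = true := by
            simp [hxk]
            intro hh; exact hkt (hh ▸ hk')
          simp [hxk] at this ⊢
          simp [this]
        · simp [hxk]
      rw [htail]
      have hcov' : ∀ x ∈ xs.filter (fun p => !(pvCnt p == k)), pvCnt x ∈ t := by
        intro x hx
        rcases List.mem_filter.mp hx with ⟨hx1, hx2⟩
        rcases List.mem_cons.mp (hcov x hx1) with h | h
        · simp [h] at hx2
        · exact h
      refine List.Perm.trans (List.Perm.append_left _ (ih _ hndt hcov')) ?_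
      have := List.filter_append_perm (fun p => pvCnt p == k) xs
      exact this

lemma pvPairwise_flatMap (ks : List Int) (g : Int → List String)
    (hks : ks.Pairwise (· < ·))
    (hmem : ∀ k, ∀ x ∈ g k, pvCnt x = k)
    (hsorted : ∀ k, (g k).Pairwise (fun a b => a ≤ b)) :
    (ks.flatMap g).Pairwise (fun a b => pvKey a ≤ pvKey b) := by
  induction ks with
  | nil => simp
  | cons k t ih =>
      rcases List.pairwise_cons.mp hks with ⟨hkt, hks'⟩
      rw [List.flatMap_cons, List.pairwise_append]
      refine ⟨?_, ih hks', ?_⟩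
      · refine (hsorted k).imp_of_mem ?_
        intro a b ha hb hab
        rw [Prod.Lex.le_iff]
        right
        exact ⟨by rw [pvKey, pvKey]; simp [hmem k a ha, hmem k b hb], hab⟩
      · intro a ha b hb
        rcases List.mem_flatMap.mp hb with ⟨k', hk', hbk'⟩
        rw [Prod.Lex.le_iff]
        left
        show pvCnt a < pvCnt b
        rw [hmem k a ha, hmem k' b hbk']
        exact hkt k' hk' 

lemma pvKey_inj : Function.Injective pvKey := by
  intro a b h
  exact congrArg (fun x => (ofLex x).2) h

lemma pvBefore_eq :
    (fun (a b : String) => (decide (pvCnt a < pvCnt b) ||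
        (!decide (pvCnt b < pvCnt a) && decide (a < b)))) =
    (fun a b => decide (pvKey a < pvKey b)) := by
  funext a b
  rcases lt_trichotomy (pvCnt a) (pvCnt b) with h | h | h
  · simp [pvKey, Prod.Lex.lt_iff, h, asymm h]
  · simp [pvKey, Prod.Lex.lt_iff, h]
  · simp [pvKey, Prod.Lex.lt_iff, asymm h, h, ne_of_gt h]

lemma pvAlt_eq_sorted (xs : List String) :
    sort_files_by_depth_alt xs = PySem.List.sorted xs pvKey false := by
  show List.foldl (fun acc x => PySem.List.insertBy
      (fun a b => decide (pvCnt a < pvCnt b) ||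
        (!decide (pvCnt b < pvCnt a) && decide (a < b))) x acc) [] xs = _
  rw [pvBefore_eq, PySem.List.sorted_eq_foldl_insertBy]

-- ===== VERDICT (by name: the statement is the Claim_ definition above) =====
theorem sort_files_by_depth_spec : Claim_equal_sort_files_by_depth := by
  intro xs _
  unfold Spec_sort_files_by_depth
  rw [pvAlt_eq_sorted]
  have hA : sort_files_by_depth xs =
      (PySem.List.sorted (xs.foldl pvStep PySem.Dict.empty).keys (fun x => x) false).flatMap
        (fun k => PySem.List.sorted ((xs.foldl pvStep PySem.Dict.empty).getD k [])
          (fun x => x) false) := by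
    show (PySem.List.sorted (xs.foldl pvStep PySem.Dict.empty).keys (fun x => x) false).foldl
        (fun acc k => acc ++ PySem.List.sorted ((xs.foldl pvStep PySem.Dict.empty).getD k [])
          (fun x => x) false) [] = _
    rw [PySem.List.foldl_append_eq_flatMap]
    simp
  set d := xs.foldl pvStep PySem.Dict.empty with hd
  set ks := PySem.List.sorted d.keys (fun x => x) false with hks
  have hkeysnd : d.keys.Nodup := pvFoldl_nodup xs _ (by simp [PySem.Dict.keys_empty])
  have hksnd : ks.Nodup := (PySem.List.sorted_perm d.keys (fun x => x) false).symm.nodup hkeysnd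
  have hkslt : ks.Pairwise (· < ·) := by
    have h1 : ks.Pairwise (fun a b => a ≤ b) := PySem.List.sorted_pairwise d.keys (fun x => x)
    exact (h1.and hksnd).imp (fun h => lt_of_le_of_ne h.1 h.2)
  have hbucket : ∀ k, d.getD k [] = xs.filter (fun p => pvCnt p == k) := by
    intro k
    rw [hd, pvFoldl_getD]
    simp
  have hcov : ∀ x ∈ xs, pvCnt x ∈ ks := by
    intro x hx
    rw [hks, PySem.List.mem_sorted]
    exact (pvFoldl_mem_keys xs _ _).mpr (Or.inr (List.mem_map_of_mem hx))
  rw [hA]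
  apply PySem.List.eq_of_perm_of_pairwise_le_of_injective pvKey pvKey_inj
  · refine List.Perm.trans ?_ (PySem.List.sorted_perm xs pvKey false).symm
    refine List.Perm.trans (List.Perm.flatMap_left ks ?_) (pvPerm_flatMap_filter ks xs hksnd hcov)
    intro k _
    rw [hbucket k]
    exact PySem.List.sorted_perm _ _ _
  · refine pvPairwise_flatMap ks _ hkslt ?_ ?_
    · intro k x hxk
      have hxf := (PySem.List.mem_sorted _ _ _ x).mp hxk
      rw [hbucket k] at hxf
      simpa using (List.mem_filter.mp hxf).2
    · intro k
      exact PySem.List.sorted_pairwise _ _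
  · exact PySem.List.sorted_pairwise xs pvKey
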